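-- pv_equiv track=rewrite | github.com/prabhudev740/misc | tasks/tasks_by_venu/solution_mar_03.py | get_saturdays_in_month
-- ===== SOURCE A (Python) =====
-- def get_saturdays_in_month(month, year):
--     if month in [4, 6, 9, 11]:
--         num_days = 30
--     elif month == 2:
--         if (year % 4 == 0 and year % 100 != 0) or (year % 400 == 0):
--             num_days = 29
--         else:
--             num_days = 28
--     else:
--         num_days = 31
--
--     saturdays = []
--     for day in range(1, num_days+1):
--         weekday = (year + (year // 4) - (year // 100) + (year // 400) + ((13 * month + 8) // 5) + day) % 7
--
--         if weekday == 6: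
--             saturdays.append(day)
--
--     return saturdays
-- ===== SOURCE B (Python) =====
-- def get_saturdays_in_month(month, year):
--     if month == 2:
--         leap = year % 4 == 0 and (year % 100 != 0 or year % 400 == 0)
--         num_days = 29 if leap else 28
--     elif month in (4, 6, 9, 11):
--         num_days = 30
--     else:
--         num_days = 31
--     anchor = (year + year // 4 - year // 100 + year // 400 + (13 * month + 8) // 5) % 7
--     day = (5 - anchor) % 7 + 1
--     out = []
--     while day <= num_days:
--         out.append(day)
--         day += 7
--     return out
-- ===== Notes on version B (the rewrite author's own statement) =====
-- stated objective: simpler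
-- what changed: B computes the day-1 weekday anchor once, derives the first Saturday, and emits Saturdays directly with a while loop stepping by 7, removing A's per-day weekday test over every day of the month; the month-length computation is restructured (month==2 handled first, factored leap test).
import Mathlib
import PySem

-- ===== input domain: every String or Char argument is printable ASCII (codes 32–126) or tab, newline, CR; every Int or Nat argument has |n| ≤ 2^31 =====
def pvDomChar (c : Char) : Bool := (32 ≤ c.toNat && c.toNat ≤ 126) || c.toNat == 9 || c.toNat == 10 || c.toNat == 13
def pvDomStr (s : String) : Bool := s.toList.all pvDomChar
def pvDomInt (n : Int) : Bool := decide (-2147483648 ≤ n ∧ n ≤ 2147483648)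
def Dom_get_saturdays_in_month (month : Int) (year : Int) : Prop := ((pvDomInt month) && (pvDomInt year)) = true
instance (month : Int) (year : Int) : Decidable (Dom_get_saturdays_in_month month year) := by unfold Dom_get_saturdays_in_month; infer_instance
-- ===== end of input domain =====

-- B computes the first Saturday from the day-1 weekday anchor and emits days stepping by 7
-- with a while-style loop — simpler: no per-day weekday test.


-- ===== PORT A =====
def get_saturdays_in_month (month : Int) (year : Int) : List Int :=
  let num_days : Int :=
    if month = 4 ∨ month = 6 ∨ month = 9 ∨ month = 11 then 30
    else if month = 2 then
      if (PySem.Int.mod year 4 = 0 ∧ PySem.Int.mod year 100 ≠ 0) ∨ PySem.Int.mod year 400 = 0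
      then 29 else 28
    else 31
  (PySem.List.pyRange 1 (num_days + 1) 1).foldl
    (fun saturdays day =>
      let weekday := PySem.Int.mod (year + PySem.Int.floordiv year 4 - PySem.Int.floordiv year 100
        + PySem.Int.floordiv year 400 + PySem.Int.floordiv (13 * month + 8) 5 + day) 7
      if weekday = 6 then saturdays ++ [day] else saturdays) []

-- ===== PORT B =====
-- the Python while loop, with a fuel bound that only makes it total (≤ 5 iterations ever run)
def satWhile : Nat → Int → Int → List Int → List Int
  | 0, _, _, out => out
  | fuel + 1, day, num_days, out =>
    if day ≤ num_days then satWhile fuel (day + 7) num_days (out ++ [day]) else out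

def get_saturdays_in_month_alt (month : Int) (year : Int) : List Int :=
  let num_days : Int :=
    if month = 2 then
      if PySem.Int.mod year 4 = 0 ∧ (PySem.Int.mod year 100 ≠ 0 ∨ PySem.Int.mod year 400 = 0)
      then 29 else 28
    else if month = 4 ∨ month = 6 ∨ month = 9 ∨ month = 11 then 30
    else 31
  let anchor : Int := PySem.Int.mod (year + PySem.Int.floordiv year 4 - PySem.Int.floordiv year 100
    + PySem.Int.floordiv year 400 + PySem.Int.floordiv (13 * month + 8) 5) 7
  let day : Int := PySem.Int.mod (5 - anchor) 7 + 1
  satWhile 40 day num_days []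

-- ===== PRECONDITION & SPEC =====
def Spec_get_saturdays_in_month (month : Int) (year : Int) (out : List Int) : Prop := out = get_saturdays_in_month_alt month year
instance (month : Int) (year : Int) (out : List Int) : Decidable (Spec_get_saturdays_in_month month year out) := by unfold Spec_get_saturdays_in_month; infer_instance

-- ===== CLAIM (what is proved, stated in full; the proofs are below) =====
def Claim_equal_get_saturdays_in_month : Prop := ∀ (month : Int) (year : Int), Dom_get_saturdays_in_month month year → Spec_get_saturdays_in_month month year (get_saturdays_in_month month year)

-- ===== LEMMAS AND PROOFS =====

-- Core fact with the day-1 anchor abstracted: filtering days 1..n by (C + d) % 7 == 6 equals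
-- the while loop that starts at the first Saturday and steps by 7, for each month length n.
theorem saturdays_core (C n : Int) (hn : n = 28 ∨ n = 29 ∨ n = 30 ∨ n = 31) :
    (PySem.List.pyRange 1 (n + 1) 1).filter (fun d => decide (PySem.Int.mod (C + d) 7 = 6))
      = satWhile 40 (PySem.Int.mod (5 - PySem.Int.mod C 7) 7 + 1) n [] := by
  have h7 : (0:Int) < 7 := by norm_num
  have hm : ∀ a : Int, PySem.Int.mod a 7 = a % 7 := fun a => PySem.Int.mod_eq_emod_of_pos h7
  have hr0 : 0 ≤ C % 7 := Int.emod_nonneg C (by norm_num)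
  have hr7 : C % 7 < 7 := Int.emod_lt_of_pos C h7
  have hcong : (PySem.List.pyRange 1 (n + 1) 1).filter (fun d => decide (PySem.Int.mod (C + d) 7 = 6))
      = (PySem.List.pyRange 1 (n + 1) 1).filter (fun d => decide (PySem.Int.mod (C % 7 + d) 7 = 6)) := by
    apply List.filter_congr
    intro d _
    simp only [hm]
    have h : (C + d) % 7 = (C % 7 + d) % 7 := by omega
    rw [h]
  rw [hcong]
  simp only [hm]
  set r := C % 7 with hr
  clear_value r
  clear hcong hr hm
  interval_cases r <;> rcases hn with hn | hn | hn | hn <;> subst hn <;> decide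

theorem get_saturdays_in_month_eq (month year : Int) :
    get_saturdays_in_month month year = get_saturdays_in_month_alt month year := by
  unfold get_saturdays_in_month get_saturdays_in_month_alt
  set C : Int := year + PySem.Int.floordiv year 4 - PySem.Int.floordiv year 100
    + PySem.Int.floordiv year 400 + PySem.Int.floordiv (13 * month + 8) 5 with hC
  -- the two month-length computations agree
  have hmod : ∀ a b : Int, 0 < b → PySem.Int.mod a b = a % b := fun a b hb => PySem.Int.mod_eq_emod_of_pos hb
  have hnd :
      (if month = 2 then
        if PySem.Int.mod year 4 = 0 ∧ (PySem.Int.mod year 100 ≠ 0 ∨ PySem.Int.mod year 400 = 0)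
        then (29:Int) else 28
       else if month = 4 ∨ month = 6 ∨ month = 9 ∨ month = 11 then 30 else 31)
      = (if month = 4 ∨ month = 6 ∨ month = 9 ∨ month = 11 then (30:Int)
         else if month = 2 then
           if (PySem.Int.mod year 4 = 0 ∧ PySem.Int.mod year 100 ≠ 0) ∨ PySem.Int.mod year 400 = 0
           then 29 else 28
         else 31) := by
    simp only [hmod year 4 (by norm_num), hmod year 100 (by norm_num), hmod year 400 (by norm_num)]
    split_ifs <;> first | rfl | omega
  rw [hnd]
  set n : Int :=
    if month = 4 ∨ month = 6 ∨ month = 9 ∨ month = 11 then (30:Int)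
    else if month = 2 then
      if (PySem.Int.mod year 4 = 0 ∧ PySem.Int.mod year 100 ≠ 0) ∨ PySem.Int.mod year 400 = 0
      then 29 else 28
    else 31 with hn
  have hncases : n = 28 ∨ n = 29 ∨ n = 30 ∨ n = 31 := by
    rw [hn]; split_ifs <;> simp
  have hA : (PySem.List.pyRange 1 (n + 1) 1).foldl
      (fun saturdays day =>
        if PySem.Int.mod (C + day) 7 = 6 then saturdays ++ [day] else saturdays) ([] : List Int)
      = (PySem.List.pyRange 1 (n + 1) 1).filter (fun d => decide (PySem.Int.mod (C + d) 7 = 6)) := by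
    have := PySem.List.foldl_append_if (fun d => decide (PySem.Int.mod (C + d) 7 = 6))
      (id : Int → Int) (PySem.List.pyRange 1 (n + 1) 1) ([] : List Int)
    simpa using this
  simp only [hA]
  exact saturdays_core C n hncases

-- ===== VERDICT (by name: the statement is the Claim_ definition above) =====
theorem get_saturdays_in_month_spec : Claim_equal_get_saturdays_in_month := by
  intro month year _
  exact get_saturdays_in_month_eq month year
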